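-- pv_equiv track=rewrite | github.com/vvrmahendra/DS-AlgoPrac | stack/powerArrays.py | solve
-- ===== SOURCE A (Python) =====
-- from collections import deque
--
-- def solve(A):
--     n = len(A)
--     pre = [n]*n
--     post = [-1]*n
--     s = deque()
--     for i in range(n):
--         while s and A[s[-1]] < 2*A[i]:
--             pre[s.pop()] = i
--
--         s.append(i)
--
--     s = deque()
--     for i in range(n-1,-1,-1):
--         while s and A[s[-1]] < 2*A[i]:
--             post[s.pop()] = i
--
--         s.append(i)
--
--     ans = 0
--     for i in range(n):
--         ans += (pre[i]-i)*(i-post[i])-1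
--
--     return ans
-- ===== SOURCE B (Python) =====
-- def solve(A):
--     # Jump-pointer DP instead of the two monotonic stacks: pre is filled
--     # right-to-left, chasing i = pre[i] pointers; post symmetrically.
--     n = len(A)
--     pre = [n] * n
--     for j in range(n - 1, -1, -1):
--         i = j + 1
--         while i < n and A[j] >= 2 * A[i]:
--             i = pre[i]
--         pre[j] = i
--     post = [-1] * n
--     for j in range(n):
--         i = j - 1
--         while i > -1 and A[j] >= 2 * A[i]:
--             i = post[i]
--         post[j] = i
--     ans = 0
--     for j in range(n):
--         ans += (pre[j] - j) * (j - post[j]) - 1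
--     return ans
-- ===== Notes on version B (the rewrite author's own statement) =====
-- stated objective: alternative
-- what changed: Replaces the two explicit monotonic-stack passes by jump-pointer dynamic programming: pre is filled right-to-left (and post left-to-right) by chasing i = pre[i] / i = post[i] pointers until the boundary condition fires, with no stack at all.
import Mathlib
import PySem

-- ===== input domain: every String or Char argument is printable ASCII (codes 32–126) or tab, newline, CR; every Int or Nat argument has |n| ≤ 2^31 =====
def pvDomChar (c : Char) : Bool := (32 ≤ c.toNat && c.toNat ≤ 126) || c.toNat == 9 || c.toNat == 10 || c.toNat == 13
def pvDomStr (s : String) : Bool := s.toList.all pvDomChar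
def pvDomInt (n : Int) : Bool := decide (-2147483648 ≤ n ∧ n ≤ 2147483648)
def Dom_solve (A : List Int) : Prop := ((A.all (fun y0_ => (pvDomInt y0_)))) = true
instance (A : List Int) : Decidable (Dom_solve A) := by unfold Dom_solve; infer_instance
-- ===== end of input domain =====

-- B replaces A's two monotonic-stack passes by jump-pointer dynamic programming
-- (pre filled right-to-left, post left-to-right, chasing i = pre[i]/post[i] pointers);
-- a genuinely different algorithm of the same cost ("alternative", no speed claim).

-- ===== PORT A =====
-- The Python deque (push/pop at the right end) is a List Nat whose TOP is the head;
-- range(n) indices are nonnegative, so they are carried as Nat, and the list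
-- indexings A[s[-1]], A[i], pre[i], post[i] are always in range in A's code, so they
-- are rendered as .getD _ 0 (exact here: the index is provably in range).
-- The inner 'while s and A[s[-1]] < 2*A[i]: ...pop...' loop is the structural
-- recursion pvPop on the stack; both passes of A run the identical pop-then-append
-- body, rendered once as pvStep.
def pvPop (A : List Int) (i : Nat) : List Int → List Nat → List Int × List Nat
  | tbl, [] => (tbl, [])
  | tbl, t :: rest =>
    if A.getD t 0 < 2 * A.getD i 0 then pvPop A i (tbl.set t (Int.ofNat i)) rest
    else (tbl, t :: rest)

def pvStep (A : List Int) (st : List Int × List Nat) (i : Nat) : List Int × List Nat :=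
  let q := pvPop A i st.1 st.2
  (q.1, i :: q.2)

def solve (A : List Int) : Int :=
  let n := A.length
  let pre := ((List.range n).foldl (pvStep A) (List.replicate n (Int.ofNat n), [])).1
  let post := ((List.range n).reverse.foldl (pvStep A) (List.replicate n (-1), [])).1
  (List.range n).foldl
    (fun ans i => ans + (pre.getD i 0 - Int.ofNat i) * (Int.ofNat i - post.getD i 0) - 1) 0

-- ===== PORT B =====
-- Source B's 'while i < n and A[j] >= 2*A[i]: i = pre[i]' loops are ported with explicit
-- fuel n+1; the chased pointer strictly increases (proved below), so a chase takes at
-- most n steps and the fuel is never exhausted.  The chased position i is Python's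
-- int i (it can be -1 in the down pass), hence Int; i.toNat is only reached under the
-- guard that makes i a valid nonnegative index.
def pvChaseUp (A : List Int) (n : Nat) (pre : List Int) (j : Nat) : Nat → Int → Int
  | 0, i => i
  | fuel+1, i =>
    if i < (n : Int) ∧ A.getD j 0 ≥ 2 * A.getD i.toNat 0 then
      pvChaseUp A n pre j fuel (pre.getD i.toNat 0)
    else i

def pvChaseDown (A : List Int) (post : List Int) (j : Nat) : Nat → Int → Int
  | 0, i => i
  | fuel+1, i =>
    if i > -1 ∧ A.getD j 0 ≥ 2 * A.getD i.toNat 0 then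
      pvChaseDown A post j fuel (post.getD i.toNat 0)
    else i

def solve_alt (A : List Int) : Int :=
  let n := A.length
  let pre := (List.range n).reverse.foldl
      (fun pre j => pre.set j (pvChaseUp A n pre j (n+1) (Int.ofNat (j+1))))
      (List.replicate n (Int.ofNat n))
  let post := (List.range n).foldl
      (fun post j => post.set j (pvChaseDown A post j (n+1) (Int.ofNat j - 1)))
      (List.replicate n (-1))
  (List.range n).foldl
    (fun ans j => ans + (pre.getD j 0 - Int.ofNat j) * (Int.ofNat j - post.getD j 0) - 1) 0

-- ===== PRECONDITION & SPEC =====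
def Spec_solve (A : List Int) (out : Int) : Prop := out = solve_alt A
instance (A : List Int) (out : Int) : Decidable (Spec_solve A out) := by unfold Spec_solve; infer_instance

-- ===== CLAIM (what is proved, stated in full; the proofs are below) =====
def Claim_equal_solve : Prop := ∀ (A : List Int), Dom_solve A → Spec_solve A (solve A)

-- ===== LEMMAS AND PROOFS =====

/- The common abstract setting: a boundary condition C : Nat → Nat → Bool on indices
   and a length n.  Both ports' `pre` tables are instances with C := pvC A, and both
   `post` tables are mirror instances with C := pvCRev A (indices reflected
   through n-1), of the two abstract table constructions below:
   · pvTB / pvT   — B's jump-pointer table (built by stages, highest index first);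
   · runM         — A's stack pass, on tables-as-functions.
   The heart of the proof is `runM_eq_pvT`: the two constructions agree. -/

def pvC (A : List Int) : Nat → Nat → Bool :=
  fun j i => decide (A.getD j 0 < 2 * A.getD i 0)

def pvCRev (A : List Int) : Nat → Nat → Bool :=
  fun j i => pvC A (A.length - 1 - j) (A.length - 1 - i)

-- B's chase loop on a table-as-function (same fuel discipline as the port).
def jchainM (C : Nat → Nat → Bool) (n : Nat) (f : Nat → Nat) (j : Nat) : Nat → Nat → Nat
  | 0, p => p
  | fuel+1, p => if p < n ∧ C j p = false then jchainM C n f j fuel (f p) else p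

-- B's table after k stages (indices n-1, n-2, …, n-k filled; the rest still n).
def pvTB (C : Nat → Nat → Bool) (n : Nat) : Nat → Nat → Nat
  | 0 => fun _ => n
  | k+1 => fun x =>
      if x = n - (k+1) then jchainM C n (pvTB C n k) (n-(k+1)) (n+1) (n-(k+1)+1)
      else pvTB C n k x

def pvT (C : Nat → Nat → Bool) (n : Nat) : Nat → Nat := pvTB C n n

-- A's stack pass on a table-as-function; stack top at the head.
def popM (C : Nat → Nat → Bool) (n : Nat) (i : Nat) :
    (Nat → Nat) × List Nat → (Nat → Nat) × List Nat
  | (f, []) => (f, [])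
  | (f, t :: r) =>
    if C t i = true then popM C n i (fun x => if x = t then i else f x, r)
    else (f, t :: r)

def stepM (C : Nat → Nat → Bool) (n : Nat) (st : (Nat → Nat) × List Nat) (i : Nat) :
    (Nat → Nat) × List Nat :=
  let q := popM C n i st
  (q.1, i :: q.2)

def runM (C : Nat → Nat → Bool) (n : Nat) : (Nat → Nat) × List Nat :=
  (List.range n).foldl (stepM C n) (fun _ => n, [])

-- ---------- basic bounds for the jump table ----------

theorem jchainM_bounds (C : Nat → Nat → Bool) (n : Nat) (f : Nat → Nat) (j lo : Nat)
    (hf : ∀ q, lo ≤ q → q < n → q < f q ∧ f q ≤ n) :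
    ∀ fuel p, lo ≤ p → p ≤ n →
      lo ≤ jchainM C n f j fuel p ∧ p ≤ jchainM C n f j fuel p ∧ jchainM C n f j fuel p ≤ n := by
  intro fuel
  induction fuel with
  | zero => intro p h1 h2; simp [jchainM]; omega
  | succ fuel ih =>
    intro p h1 h2
    simp only [jchainM]
    by_cases hc : p < n ∧ C j p = false
    · rw [if_pos hc]
      have hq := hf p h1 hc.1
      have := ih (f p) (by omega) hq.2
      exact ⟨this.1, by omega, this.2.2⟩
    · rw [if_neg hc]; omega

theorem pvTB_bounds (C : Nat → Nat → Bool) (n : Nat) :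
    ∀ k, k ≤ n → ∀ x, pvTB C n k x ≤ n ∧ (n - k ≤ x → x < n → x < pvTB C n k x) := by
  intro k
  induction k with
  | zero => intro _ x; exact ⟨by simp [pvTB], by intro h1 h2; simp [pvTB]; omega⟩
  | succ k ih =>
    intro hk x
    have ihk := ih (by omega)
    by_cases hx : x = n - (k+1)
    · subst hx
      have he : pvTB C n (k+1) (n-(k+1)) = jchainM C n (pvTB C n k) (n-(k+1)) (n+1) (n-(k+1)+1) := by
        simp [pvTB]
      rw [he]
      have hb := jchainM_bounds C n (pvTB C n k) (n-(k+1)) (n-k)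
        (fun q hq1 hq2 => ⟨(ihk q).2 hq1 hq2, (ihk q).1⟩) (n+1) (n-(k+1)+1)
        (by omega) (by omega)
      exact ⟨hb.2.2, fun _ _ => by omega⟩
    · simp only [pvTB, if_neg hx]
      exact ⟨(ihk x).1, fun h1 h2 => (ihk x).2 (by omega) h2⟩

theorem pvTB_stab (C : Nat → Nat → Bool) (n : Nat) :
    ∀ k k', k ≤ k' → k' ≤ n → ∀ x, n - k ≤ x → pvTB C n k' x = pvTB C n k x := by
  intro k k'
  induction k' with
  | zero => intro h1 _ x _; have : k = 0 := by omega
            subst this; rfl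
  | succ k' ih =>
    intro h1 h2 x hx
    rcases Nat.eq_or_lt_of_le h1 with h|h
    · subst h; rfl
    · have : pvTB C n (k'+1) x = pvTB C n k' x := by
        simp only [pvTB]
        rw [if_neg (by omega)]
      rw [this]
      exact ih (by omega) (by omega) x hx

theorem pvT_le (C : Nat → Nat → Bool) (n : Nat) (x : Nat) : pvT C n x ≤ n :=
  (pvTB_bounds C n n (le_refl n) x).1

theorem pvT_gt (C : Nat → Nat → Bool) (n : Nat) (x : Nat) (hx : x < n) : x < pvT C n x :=
  (pvTB_bounds C n n (le_refl n) x).2 (by omega) hx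

-- The fuel-free chase on the FINAL table; well-founded because the table is increasing.
def pchain (C : Nat → Nat → Bool) (n : Nat) (j : Nat) (p : Nat) : Nat :=
  if h : p < n ∧ C j p = false then pchain C n j (pvT C n p) else p
  termination_by n - p
  decreasing_by
    have h1 := pvT_gt C n p h.1
    omega

theorem pchain_ge (C : Nat → Nat → Bool) (n : Nat) (j : Nat) :
    ∀ p, p ≤ pchain C n j p := by
  intro p
  induction p using pchain.induct C n j with
  | case1 p h ih =>
    rw [pchain, dif_pos h]
    have := pvT_gt C n p h.1
    omega
  | case2 p h => rw [pchain, dif_neg h]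

-- characterisation of B's table by the fuel-free chase
theorem jchain_eq_pchain (C : Nat → Nat → Bool) (n : Nat) (j : Nat) (g : Nat → Nat)
    (hg : ∀ q, j < q → q < n → g q = pvT C n q) :
    ∀ fuel p, j < p → p ≤ n → n - p < fuel →
      jchainM C n g j fuel p = pchain C n j p := by
  intro fuel
  induction fuel with
  | zero => intro p _ _ h; omega
  | succ fuel ih =>
    intro p h1 h2 h3
    simp only [jchainM]
    rw [pchain]
    by_cases hc : p < n ∧ C j p = false
    · rw [if_pos hc, dif_pos hc, hg p h1 hc.1]
      have hgt := pvT_gt C n p hc.1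
      have hle := pvT_le C n p
      exact ih (pvT C n p) (by omega) hle (by omega)
    · rw [if_neg hc, dif_neg hc]

theorem pvTB_succ_self (C : Nat → Nat → Bool) (n k : Nat) :
    pvTB C n (k+1) (n-(k+1)) = jchainM C n (pvTB C n k) (n-(k+1)) (n+1) (n-(k+1)+1) := by
  simp [pvTB]

theorem pvT_eq_pchain (C : Nat → Nat → Bool) (n : Nat) (j : Nat) (hj : j < n) :
    pvT C n j = pchain C n j (j+1) := by
  have h1 : pvT C n j = pvTB C n (n-j-1+1) j :=
    pvTB_stab C n (n-j-1+1) n (by omega) (le_refl n) j (by omega)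
  have hx : n - (n-j-1+1) = j := by omega
  have h2 := pvTB_succ_self C n (n-j-1)
  rw [hx] at h2
  rw [h1, h2]
  exact jchain_eq_pchain C n j (pvTB C n (n-j-1))
    (fun q hq1 hq2 => (pvTB_stab C n (n-j-1) n (by omega) (le_refl n) q (by omega)).symm)
    (n+1) (j+1) (by omega) (by omega) (by omega)

-- chase composition: if everything in (t, v) jumps to at most v and the chase result
-- is at least v, the chase from inside the interval equals the chase from v.
theorem pchain_through (C : Nat → Nat → Bool) (n : Nat) (t v : Nat) (hv : v < n)
    (hint : ∀ k, t < k → k < v → pvT C n k ≤ v) :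
    ∀ d p, v - p ≤ d → t < p → p ≤ v → v ≤ pchain C n t p →
      pchain C n t p = pchain C n t v := by
  intro d
  induction d with
  | zero => intro p h1 _ h3 _; have : p = v := by omega
            subst this; rfl
  | succ d ih =>
    intro p h1 h2 h3 h4
    rcases Nat.eq_or_lt_of_le h3 with h|h
    · subst h; rfl
    · have hc : p < n ∧ C t p = false := by
        constructor
        · omega
        · by_contra hcc
          have : pchain C n t p = p := by
            rw [pchain, dif_neg]
            intro hx
            exact hcc hx.2
          omega
      have hgt := pvT_gt C n p hc.1
      have heq : pchain C n t p = pchain C n t (pvT C n p) := by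
        rw [pchain, dif_pos hc]
      rw [heq] at h4 ⊢
      exact ih (pvT C n p) (by have := hint p h2 h; omega) (by omega)
        (hint p h2 h) h4

-- the KEY fact: for the stack top t at step i, popping (C t i) happens iff pvT t = i
theorem key_pop (C : Nat → Nat → Bool) (n : Nat) (t i : Nat) (ht : t < i) (hi : i < n)
    (hTt : i ≤ pvT C n t) (hint : ∀ k, t < k → k < i → pvT C n k ≤ i) :
    (C t i = true → pvT C n t = i) ∧ (C t i = false → i < pvT C n t) := by
  have hchar := pvT_eq_pchain C n t (by omega)
  have hthr := pchain_through C n t i hi hint (i - (t+1)) (t+1) (le_refl _)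
    (by omega) (by omega) (by rw [← hchar]; exact hTt)
  have hTi : pvT C n t = pchain C n t i := by rw [hchar, hthr]
  constructor
  · intro hc
    rw [hTi, pchain, dif_neg (by simp [hc])]
  · intro hc
    rw [hTi, pchain, dif_pos ⟨hi, hc⟩]
    have := pchain_ge C n t (pvT C n i)
    have := pvT_gt C n i hi
    omega

-- ---------- the stack invariant ----------

def adjP (C : Nat → Nat → Bool) (n : Nat) : Nat → Nat → Prop :=
  fun v u => ∀ k, u < k → k < v → pvT C n k ≤ v

def StInv (C : Nat → Nat → Bool) (n i : Nat) (f : Nat → Nat) (s : List Nat) : Prop :=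
  (∀ t ∈ s, t < i ∧ i ≤ pvT C n t) ∧
  List.Pairwise (· > ·) s ∧
  (∀ j, j < i → j ∉ s → pvT C n j < i) ∧
  List.IsChain (adjP C n) s ∧
  (∀ j, f j = if j < i ∧ j ∉ s ∧ pvT C n j ≤ i then pvT C n j else n)

-- survivors below a surviving top also survive
theorem surv_below (C : Nat → Nat → Bool) (n i : Nat) (hi : i < n) :
    ∀ (s : List Nat) (t : Nat), t < i → i < pvT C n t →
      (∀ u ∈ s, u < i ∧ i ≤ pvT C n u) →
      List.Pairwise (· > ·) (t :: s) →
      List.IsChain (adjP C n) (t :: s) →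
      ∀ u ∈ s, i < pvT C n u := by
  intro s
  induction s with
  | nil => intro _ _ _ _ _ _ u hu; cases hu
  | cons u r ih =>
    intro t ht hTt hI1 hpw hch
    have hut : u < t := by
      rcases List.pairwise_cons.1 hpw with ⟨h1, _⟩
      exact h1 u List.mem_cons_self
    have hu1 := hI1 u List.mem_cons_self
    have hadj : adjP C n t u := (List.isChain_cons_cons.1 hch).1
    have hTu : i < pvT C n u := by
      have hchar := pvT_eq_pchain C n u (by omega)
      have hthr := pchain_through C n u t (by omega) hadj (t - (u+1)) (u+1)
        (le_refl _) (by omega) (by omega) (by rw [← hchar]; omega)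
      have hTu' : pvT C n u = pchain C n u t := by rw [hchar, hthr]
      have hc : t < n ∧ C u t = false := by
        constructor
        · omega
        · by_contra hcc
          have : pchain C n u t = t := by
            rw [pchain, dif_neg]
            intro hx
            exact hcc hx.2
          omega
      rw [hTu', pchain, dif_pos hc]
      have := pchain_ge C n u (pvT C n t)
      omega
    intro v hv
    rcases List.mem_cons.1 hv with rfl|hv'
    · exact hTu
    · exact ih u (by omega) hTu (fun w hw => hI1 w (List.mem_cons_of_mem _ hw))
        (List.pairwise_cons.1 hpw).2 hch.tail v hv' 

theorem pop_spec (C : Nat → Nat → Bool) (n i : Nat) (hi : i < n) :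
    ∀ (s : List Nat) (f : Nat → Nat),
      (∀ t ∈ s, t < i ∧ i ≤ pvT C n t) →
      List.Pairwise (· > ·) s →
      List.IsChain (adjP C n) s →
      (∀ j, j < i → j ∉ s → pvT C n j ≤ i) →
      (∀ j, f j = if j < i ∧ j ∉ s ∧ pvT C n j ≤ i then pvT C n j else n) →
      (∀ t ∈ (popM C n i (f, s)).2, t < i ∧ i < pvT C n t) ∧
      List.Pairwise (· > ·) (popM C n i (f, s)).2 ∧
      List.IsChain (adjP C n) (popM C n i (f, s)).2 ∧
      (∀ j, j < i → j ∉ (popM C n i (f, s)).2 → pvT C n j ≤ i) ∧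
      (∀ j, (popM C n i (f, s)).1 j =
        if j < i ∧ j ∉ (popM C n i (f, s)).2 ∧ pvT C n j ≤ i then pvT C n j else n) := by
  intro s
  induction s with
  | nil =>
    intro f _ _ _ h3 h5
    have hp : popM C n i (f, ([] : List Nat)) = (f, []) := by simp [popM]
    rw [hp]
    refine ⟨?_, ?_, ?_, ?_, ?_⟩
    · intro t ht; exact absurd ht List.not_mem_nil
    · exact List.Pairwise.nil
    · simp
    · intro j hj _; exact h3 j hj List.not_mem_nil
    · exact h5
  | cons t r ih =>
    intro f hI1 hpw hch h3 h5
    have ht := hI1 t List.mem_cons_self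
    have htr : ∀ u ∈ r, u < t := (List.pairwise_cons.1 hpw).1
    have htnr : t ∉ r := fun hmem => by have := htr t hmem; omega
    have hint : ∀ k, t < k → k < i → pvT C n k ≤ i := by
      intro k hk1 hk2
      refine h3 k hk2 ?_
      intro hmem
      rcases List.mem_cons.1 hmem with rfl|hm
      · omega
      · have := htr k hm; omega
    have hkey := key_pop C n t i ht.1 hi ht.2 hint
    by_cases hc : C t i = true
    · have hTt : pvT C n t = i := hkey.1 hc
      have hpop : popM C n i (f, t :: r) =
          popM C n i (fun x => if x = t then i else f x, r) := by
        simp only [popM, if_pos hc]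
      rw [hpop]
      refine ih (fun x => if x = t then i else f x)
        (fun u hu => hI1 u (List.mem_cons_of_mem _ hu))
        (List.pairwise_cons.1 hpw).2 hch.tail ?_ ?_
      · intro j hj hjr
        by_cases hjt : j = t
        · subst hjt; omega
        · exact h3 j hj (by simp [hjt, hjr])
      · intro j
        by_cases hjt : j = t
        · subst hjt
          have hcd : j < i ∧ j ∉ r ∧ pvT C n j ≤ i := ⟨ht.1, htnr, by omega⟩
          rw [if_pos hcd]
          simp [hTt]
        · simp only [if_neg hjt]
          rw [h5 j]
          by_cases hjm : j ∈ r
          · rw [if_neg (by simp [hjm]), if_neg (by simp [hjm])]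
          · by_cases hcond : j < i ∧ pvT C n j ≤ i
            · have hcd1 : j < i ∧ j ∉ t :: r ∧ pvT C n j ≤ i :=
                ⟨hcond.1, by simp [hjt, hjm], hcond.2⟩
              have hcd2 : j < i ∧ j ∉ r ∧ pvT C n j ≤ i := ⟨hcond.1, hjm, hcond.2⟩
              rw [if_pos hcd1, if_pos hcd2]
            · rw [if_neg (by
                intro hx
                exact hcond ⟨hx.1, hx.2.2⟩), if_neg (by
                intro hx
                exact hcond ⟨hx.1, hx.2.2⟩)]
    · have hc' : C t i = false := by simpa using hc
      have hTt := hkey.2 hc'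
      have hpop : popM C n i (f, t :: r) = (f, t :: r) := by
        simp only [popM, hc']
        simp
      rw [hpop]
      have hsurv := surv_below C n i hi r t ht.1 hTt
        (fun u hu => hI1 u (List.mem_cons_of_mem _ hu)) hpw hch
      refine ⟨?_, hpw, hch, h3, h5⟩
      intro u hu
      rcases List.mem_cons.1 hu with rfl|hu'
      · exact ⟨ht.1, hTt⟩
      · exact ⟨(hI1 u hu).1, hsurv u hu'⟩

theorem step_inv (C : Nat → Nat → Bool) (n i : Nat) (hi : i < n)
    (f : Nat → Nat) (s : List Nat) (h : StInv C n i f s) :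
    StInv C n (i+1) (stepM C n (f, s) i).1 (stepM C n (f, s) i).2 := by
  obtain ⟨hI1, hpw, hI3, hch, hI5⟩ := h
  have hps := pop_spec C n i hi s f hI1 hpw hch
    (fun j hj hjs => le_of_lt (hI3 j hj hjs)) hI5
  obtain ⟨hC1, hC2, hC3, hC4, hC5⟩ := hps
  set q := popM C n i (f, s) with hq
  have hstep : stepM C n (f, s) i = (q.1, i :: q.2) := rfl
  rw [hstep]
  refine ⟨?_, ?_, ?_, ?_, ?_⟩
  · intro t htm
    rcases List.mem_cons.1 htm with rfl|htm'
    · exact ⟨by omega, pvT_gt C n t hi⟩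
    · have := hC1 t htm'
      exact ⟨by omega, by omega⟩
  · rw [List.pairwise_cons]
    exact ⟨fun u hu => (hC1 u hu).1, hC2⟩
  · intro j hj hjm
    have hji : j ≠ i := fun hx => hjm (hx ▸ List.mem_cons_self)
    have hjs : j ∉ q.2 := fun hx => hjm (List.mem_cons_of_mem _ hx)
    have := hC4 j (by omega) hjs
    omega
  · cases hq2 : q.2 with
    | nil => simp
    | cons u r =>
      rw [List.isChain_cons_cons]
      constructor
      · intro k hk1 hk2
        have hur : ∀ w ∈ r, w < u := by
          have := hC2
          rw [hq2, List.pairwise_cons] at this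
          exact this.1
        have hknm : k ∉ q.2 := by
          rw [hq2]
          intro hx
          rcases List.mem_cons.1 hx with rfl|hx'
          · omega
          · have := hur k hx'; omega
        exact hC4 k hk2 hknm
      · rw [← hq2]; exact hC3
  · intro j
    rw [hC5 j]
    by_cases hji : j = i
    · subst hji
      rw [if_neg (by intro hx; omega), if_neg (by
        intro hx
        exact hx.2.1 List.mem_cons_self)]
    · by_cases hjlt : j < i
      · by_cases hjm : j ∈ q.2
        · rw [if_neg (by intro hx; exact hx.2.1 hjm), if_neg (by
            intro hx
            exact hx.2.1 (List.mem_cons_of_mem _ hjm))]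
        · have hle := hC4 j hjlt hjm
          rw [if_pos ⟨hjlt, hjm, hle⟩, if_pos ⟨by omega, by
            intro hx
            rcases List.mem_cons.1 hx with h'|h'
            · exact hji h'
            · exact hjm h', by omega⟩]
      · rw [if_neg (by intro hx; omega), if_neg (by intro hx; omega)]

theorem run_inv (C : Nat → Nat → Bool) (n : Nat) :
    ∀ i, i ≤ n →
      StInv C n i ((List.range i).foldl (stepM C n) (fun _ => n, [])).1
        ((List.range i).foldl (stepM C n) (fun _ => n, [])).2 := by
  intro i
  induction i with
  | zero =>
    intro _
    refine ⟨by simp, by simp, by intro j hj; omega, by simp, ?_⟩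
    intro j
    rw [if_neg (by intro hx; omega)]
    simp
  | succ i ih =>
    intro hi
    rw [List.range_succ, List.foldl_append, List.foldl_cons, List.foldl_nil]
    have hinv := ih (by omega)
    have := step_inv C n i (by omega)
      ((List.range i).foldl (stepM C n) (fun _ => n, [])).1
      ((List.range i).foldl (stepM C n) (fun _ => n, [])).2 hinv
    simpa using this

-- MAIN: the stack table and the jump table agree
theorem runM_eq_pvT (C : Nat → Nat → Bool) (n : Nat) (j : Nat) (hj : j < n) :
    (runM C n).1 j = pvT C n j := by
  obtain ⟨hI1, _, hI3, _, hI5⟩ := run_inv C n n (le_refl n)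
  unfold runM
  rw [hI5 j]
  by_cases hjm : j ∈ ((List.range n).foldl (stepM C n) (fun _ => n, [])).2
  · have h1 := hI1 j hjm
    have h2 := pvT_le C n j
    rw [if_neg (by intro hx; exact hx.2.1 hjm)]
    omega
  · have h1 := hI3 j hj hjm
    rw [if_pos ⟨hj, hjm, by omega⟩]

-- ---------- bridges between the ports and the abstract constructions ----------

theorem getD_set_lt (l : List Int) (t x : Nat) (v : Int) (ht : t < l.length)
    (hx : x < l.length) :
    (l.set t v).getD x 0 = if x = t then v else l.getD x 0 := by
  rcases eq_or_ne x t with rfl|hne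
  · simp [List.getD_eq_getElem?_getD, ht]
  · simp [List.getD_eq_getElem?_getD, List.getElem?_set_ne (Ne.symm hne), hne]

theorem foldl_rel {α β γ : Type} (R : α → β → Prop) (g : α → γ → α) (h : β → γ → β) :
    ∀ (L : List γ) (a : α) (b : β), R a b →
      (∀ a b x, x ∈ L → R a b → R (g a x) (h b x)) →
      R (L.foldl g a) (L.foldl h b) := by
  intro L
  induction L with
  | nil => intro a b hR _; exact hR
  | cons x L ih =>
    intro a b hR hstep
    exact ih (g a x) (h b x) (hstep a b x (List.mem_cons_self) hR)
      (fun a b y hy => hstep a b y (List.mem_cons_of_mem _ hy))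

theorem reverse_range (n : Nat) :
    (List.range n).reverse = (List.range n).map (fun k => n - 1 - k) := by
  apply List.ext_getElem
  · simp
  · intro i h1 h2
    simp [List.getElem_reverse, List.getElem_range, List.getElem_map]

theorem popM_mem (C : Nat → Nat → Bool) (n i : Nat) :
    ∀ (s : List Nat) (f : Nat → Nat), ∀ t ∈ (popM C n i (f, s)).2, t ∈ s := by
  intro s
  induction s with
  | nil => intro f t ht; simpa [popM] using ht
  | cons u r ih =>
    intro f t ht
    by_cases hc : C u i = true
    · rw [show popM C n i (f, u :: r) =
          popM C n i (fun x => if x = u then i else f x, r) by simp [popM, hc]] at ht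
      exact List.mem_cons_of_mem _ (ih _ t ht)
    · rw [show popM C n i (f, u :: r) = (f, u :: r) by
        simp only [popM]; simp [hc]] at ht
      exact ht

theorem popA_bridge (A : List Int) (i : Nat) :
    ∀ (s : List Nat) (tbl : List Int) (f : Nat → Nat),
      tbl.length = A.length → (∀ t ∈ s, t < A.length) →
      (∀ x, x < A.length → tbl.getD x 0 = Int.ofNat (f x)) →
      (pvPop A i tbl s).2 = (popM (pvC A) A.length i (f, s)).2 ∧
      (pvPop A i tbl s).1.length = A.length ∧
      (∀ x, x < A.length →
        (pvPop A i tbl s).1.getD x 0 = Int.ofNat ((popM (pvC A) A.length i (f, s)).1 x)) := by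
  intro s
  induction s with
  | nil =>
    intro tbl f hl _ hrel
    rw [show popM (pvC A) A.length i (f, []) = (f, []) by simp [popM]]
    exact ⟨rfl, hl, hrel⟩
  | cons t r ih =>
    intro tbl f hl hs hrel
    have htn : t < A.length := hs t List.mem_cons_self
    by_cases hc : A.getD t 0 < 2 * A.getD i 0
    · have hcC : pvC A t i = true := by unfold pvC; exact decide_eq_true hc
      have hport : pvPop A i tbl (t :: r) = pvPop A i (tbl.set t (Int.ofNat i)) r := by
        simp only [pvPop]; rw [if_pos hc]
      have hmod : popM (pvC A) A.length i (f, t :: r) =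
          popM (pvC A) A.length i (fun x => if x = t then i else f x, r) := by
        simp [popM, hcC]
      rw [hport, hmod]
      refine ih (tbl.set t (Int.ofNat i)) (fun x => if x = t then i else f x)
        (by simp [hl]) (fun u hu => hs u (List.mem_cons_of_mem _ hu)) ?_
      intro x hx
      rw [getD_set_lt tbl t x (Int.ofNat i) (by omega) (by omega)]
      by_cases hxt : x = t
      · subst hxt
        have h2 : ((fun y => if y = x then i else f y) x) = i := by simp
        rw [if_pos rfl, h2]
      · have h2 : ((fun y => if y = t then i else f y) x) = f x := by simp [hxt]
        rw [if_neg hxt, h2]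
        exact hrel x hx
    · have hcC : pvC A t i = false := by unfold pvC; exact decide_eq_false hc
      have hport : pvPop A i tbl (t :: r) = (tbl, t :: r) := by
        simp only [pvPop]; rw [if_neg hc]
      have hmod : popM (pvC A) A.length i (f, t :: r) = (f, t :: r) := by
        simp only [popM]; simp [hcC]
      rw [hport, hmod]
      exact ⟨rfl, hl, hrel⟩

def RAfwd (A : List Int) (a : List Int × List Nat) (b : (Nat → Nat) × List Nat) : Prop :=
  a.2 = b.2 ∧ a.1.length = A.length ∧ (∀ t ∈ b.2, t < A.length) ∧
  ∀ x, x < A.length → a.1.getD x 0 = Int.ofNat (b.1 x)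

-- port A forward pass produces runM's table (encoded)
theorem bridgeA_fwd (A : List Int) :
    ∀ x, x < A.length →
      (((List.range A.length).foldl (pvStep A)
          (List.replicate A.length (Int.ofNat A.length), [])).1).getD x 0
        = Int.ofNat ((runM (pvC A) A.length).1 x) := by
  have hfold := foldl_rel (RAfwd A) (pvStep A) (stepM (pvC A) A.length)
    (List.range A.length)
    (List.replicate A.length (Int.ofNat A.length), [])
    ((fun _ => A.length), [])
    ⟨rfl, by simp, by simp, fun x hx => by simp [hx]⟩
    ?_
  · intro x hx
    exact hfold.2.2.2 x hx
  · rintro ⟨tbl, sp⟩ ⟨f, sm⟩ i hi ⟨h1, h2, h3, h4⟩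
    simp only at h1
    subst h1
    have hb := popA_bridge A i sp tbl f h2 h3 h4
    refine ⟨?_, ?_, ?_, ?_⟩
    · simp only [pvStep, stepM]
      rw [hb.1]
    · simpa [pvStep] using hb.2.1
    · intro t ht
      simp only [stepM] at ht
      rcases List.mem_cons.1 ht with rfl|ht'
      · simpa using hi
      · exact h3 t (popM_mem (pvC A) A.length i sp f t ht')
    · intro x hx
      simpa [pvStep, stepM] using hb.2.2 x hx

theorem popA_bridge_rev (A : List Int) (i : Nat) (hi : i < A.length) :
    ∀ (sm : List Nat) (tbl : List Int) (f : Nat → Nat),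
      tbl.length = A.length → (∀ t ∈ sm, t < A.length) →
      (∀ y, y < A.length → tbl.getD (A.length - 1 - y) 0
        = (A.length : Int) - 1 - Int.ofNat (f y)) →
      (pvPop A (A.length - 1 - i) tbl (sm.map (fun t => A.length - 1 - t))).2
        = ((popM (pvCRev A) A.length i (f, sm)).2).map (fun t => A.length - 1 - t) ∧
      (pvPop A (A.length - 1 - i) tbl (sm.map (fun t => A.length - 1 - t))).1.length = A.length ∧
      (∀ y, y < A.length →
        (pvPop A (A.length - 1 - i) tbl (sm.map (fun t => A.length - 1 - t))).1.getD (A.length - 1 - y) 0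
          = (A.length : Int) - 1 - Int.ofNat ((popM (pvCRev A) A.length i (f, sm)).1 y)) := by
  intro sm
  induction sm with
  | nil =>
    intro tbl f hl _ hrel
    rw [show popM (pvCRev A) A.length i (f, []) = (f, []) by simp [popM]]
    exact ⟨rfl, hl, hrel⟩
  | cons t r ih =>
    intro tbl f hl hs hrel
    have htn : t < A.length := hs t List.mem_cons_self
    have hcd : (A.getD (A.length - 1 - t) 0 < 2 * A.getD (A.length - 1 - i) 0)
        ↔ pvCRev A t i = true := by
      unfold pvCRev pvC
      exact ⟨fun h => decide_eq_true h, fun h => of_decide_eq_true h⟩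
    by_cases hc : A.getD (A.length - 1 - t) 0 < 2 * A.getD (A.length - 1 - i) 0
    · have hcC : pvCRev A t i = true := hcd.1 hc
      have hport : pvPop A (A.length - 1 - i) tbl ((t :: r).map (fun u => A.length - 1 - u))
          = pvPop A (A.length - 1 - i)
              (tbl.set (A.length - 1 - t) (Int.ofNat (A.length - 1 - i)))
              (r.map (fun u => A.length - 1 - u)) := by
        simp only [List.map_cons, pvPop]
        rw [if_pos hc]
      have hmod : popM (pvCRev A) A.length i (f, t :: r) =
          popM (pvCRev A) A.length i (fun x => if x = t then i else f x, r) := by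
        simp [popM, hcC]
      rw [hport, hmod]
      refine ih (tbl.set (A.length - 1 - t) (Int.ofNat (A.length - 1 - i)))
        (fun x => if x = t then i else f x)
        (by simp [hl]) (fun u hu => hs u (List.mem_cons_of_mem _ hu)) ?_
      intro y hy
      rw [getD_set_lt tbl (A.length - 1 - t) (A.length - 1 - y)
        (Int.ofNat (A.length - 1 - i)) (by omega) (by omega)]
      by_cases hyt : y = t
      · subst hyt
        have h2 : ((fun x => if x = y then i else f x) y) = i := by simp
        rw [if_pos rfl, h2]
        simp only [Int.ofNat_eq_natCast]
        omega
      · have h2 : ((fun x => if x = t then i else f x) y) = f y := by simp [hyt]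
        rw [if_neg (by omega), h2]
        exact hrel y hy
    · have hcC : pvCRev A t i = false := by
        rcases Bool.eq_false_or_eq_true (pvCRev A t i) with h|h
        · exact absurd (hcd.2 h) hc
        · exact h
      have hport : pvPop A (A.length - 1 - i) tbl ((t :: r).map (fun u => A.length - 1 - u))
          = (tbl, (t :: r).map (fun u => A.length - 1 - u)) := by
        simp only [List.map_cons, pvPop]
        rw [if_neg hc]
      have hmod : popM (pvCRev A) A.length i (f, t :: r) = (f, t :: r) := by
        simp only [popM]; simp [hcC]
      rw [hport, hmod]
      exact ⟨rfl, hl, hrel⟩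

def RAbwd (A : List Int) (a : List Int × List Nat) (b : (Nat → Nat) × List Nat) : Prop :=
  a.2 = b.2.map (fun t => A.length - 1 - t) ∧ a.1.length = A.length ∧
  (∀ t ∈ b.2, t < A.length) ∧
  ∀ y, y < A.length → a.1.getD (A.length - 1 - y) 0
    = (A.length : Int) - 1 - Int.ofNat (b.1 y)

-- port A backward pass produces the mirrored runM table
theorem bridgeA_bwd (A : List Int) :
    ∀ x, x < A.length →
      (((List.range A.length).reverse.foldl (pvStep A)
          (List.replicate A.length (-1 : Int), [])).1).getD x 0
        = (A.length : Int) - 1 - Int.ofNat ((runM (pvCRev A) A.length).1 (A.length - 1 - x)) := by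
  rw [reverse_range, List.foldl_map]
  have hfold := foldl_rel (RAbwd A)
    (fun st k => pvStep A st (A.length - 1 - k)) (stepM (pvCRev A) A.length)
    (List.range A.length)
    (List.replicate A.length (-1 : Int), [])
    ((fun _ => A.length), [])
    ⟨by simp, by simp, by simp, fun y hy => by
      have hlt : A.length - 1 - y < A.length := by omega
      simp [hlt, Int.ofNat_eq_natCast]⟩
    ?_
  · intro x hx
    have := hfold.2.2.2 (A.length - 1 - x) (by omega)
    rwa [show A.length - 1 - (A.length - 1 - x) = x by omega] at this
  · rintro ⟨tbl, sp⟩ ⟨f, sm⟩ i hi ⟨h1, h2, h3, h4⟩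
    simp only at h1
    subst h1
    have him : i < A.length := List.mem_range.1 hi
    have hb := popA_bridge_rev A i him sm tbl f h2 h3 h4
    refine ⟨?_, ?_, ?_, ?_⟩
    · simp only [pvStep, stepM, List.map_cons]
      rw [hb.1]
    · simpa [pvStep] using hb.2.1
    · intro t ht
      simp only [stepM] at ht
      rcases List.mem_cons.1 ht with rfl|ht'
      · exact him
      · exact h3 t (popM_mem (pvCRev A) A.length i sm f t ht')
    · intro y hy
      simpa [pvStep, stepM] using hb.2.2 y hy

theorem chaseUp_bridge (A : List Int) (g : Nat → Nat) (tbl : List Int) (j : Nat)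
    (hl : tbl.length = A.length)
    (hrel : ∀ x, x < A.length → tbl.getD x 0 = Int.ofNat (g x)) :
    ∀ fuel p, pvChaseUp A A.length tbl j fuel (Int.ofNat p)
      = Int.ofNat (jchainM (pvC A) A.length g j fuel p) := by
  intro fuel
  induction fuel with
  | zero => intro p; rfl
  | succ fuel ih =>
    intro p
    simp only [pvChaseUp, jchainM]
    have htn : (Int.ofNat p).toNat = p := by simp
    by_cases hp : p < A.length
    · by_cases hcv : A.getD j 0 < 2 * A.getD p 0
      · have hcC : pvC A j p = true := by unfold pvC; exact decide_eq_true hcv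
        rw [if_neg (by rw [htn]; intro hx; omega), if_neg (by simp [hcC])]
      · have hcC : pvC A j p = false := by unfold pvC; exact decide_eq_false hcv
        rw [if_pos (by rw [htn]; exact ⟨by simp [Int.ofNat_eq_natCast]; omega, by omega⟩),
          if_pos ⟨hp, hcC⟩, htn, hrel p hp]
        exact ih (g p)
    · rw [if_neg (by intro hx; have := hx.1; simp [Int.ofNat_eq_natCast] at this; omega),
        if_neg (by intro hx; exact hp hx.1)]

theorem stageB_fwd (A : List Int) :
    ∀ k, k ≤ A.length →
      (((List.range' (A.length - k) k).reverse).foldl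
          (fun pre j => pre.set j (pvChaseUp A A.length pre j (A.length+1) (Int.ofNat (j+1))))
          (List.replicate A.length (Int.ofNat A.length))).length = A.length ∧
      ∀ x, x < A.length →
        (((List.range' (A.length - k) k).reverse).foldl
            (fun pre j => pre.set j (pvChaseUp A A.length pre j (A.length+1) (Int.ofNat (j+1))))
            (List.replicate A.length (Int.ofNat A.length))).getD x 0
          = Int.ofNat (pvTB (pvC A) A.length k x) := by
  intro k
  induction k with
  | zero =>
    intro _
    refine ⟨by simp, ?_⟩
    intro x hx
    simp [pvTB, hx]
  | succ k ih =>
    intro hk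
    obtain ⟨ihl, ihrel⟩ := ih (by omega)
    have hsplit : List.range' (A.length - (k+1)) (k+1)
        = (A.length - (k+1)) :: List.range' (A.length - k) k := by
      have h1 : A.length - (k+1) + 1 = A.length - k := by omega
      rw [List.range'_succ, h1]
    rw [hsplit, List.reverse_cons, List.foldl_append, List.foldl_cons, List.foldl_nil]
    set tblk := ((List.range' (A.length - k) k).reverse).foldl
        (fun pre j => pre.set j (pvChaseUp A A.length pre j (A.length+1) (Int.ofNat (j+1))))
        (List.replicate A.length (Int.ofNat A.length)) with htblk
    clear_value tblk
    have hj : A.length - (k+1) < A.length := by omega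
    have hchase := chaseUp_bridge A (pvTB (pvC A) A.length k) tblk (A.length - (k+1))
      ihl ihrel (A.length+1) (A.length - (k+1) + 1)
    refine ⟨by simp [ihl], ?_⟩
    intro x hx
    have hb1 : A.length - (k+1) < tblk.length := by rw [ihl]; omega
    have hb2 : x < tblk.length := by rw [ihl]; omega
    rw [getD_set_lt tblk (A.length - (k+1)) x _ hb1 hb2]
    by_cases hxj : x = A.length - (k+1)
    · subst hxj
      rw [if_pos rfl, hchase, pvTB_succ_self]
    · rw [if_neg hxj, ihrel x hx]
      have : pvTB (pvC A) A.length (k+1) x = pvTB (pvC A) A.length k x := by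
        simp only [pvTB]
        rw [if_neg hxj]
      rw [this]

-- port B forward pass produces B's jump table (encoded)
theorem bridgeB_fwd (A : List Int) :
    ∀ x, x < A.length →
      ((List.range A.length).reverse.foldl
          (fun pre j => pre.set j (pvChaseUp A A.length pre j (A.length+1) (Int.ofNat (j+1))))
          (List.replicate A.length (Int.ofNat A.length))).getD x 0
        = Int.ofNat (pvT (pvC A) A.length x) := by
  intro x hx
  have := (stageB_fwd A A.length (le_refl _)).2 x hx
  rw [List.range_eq_range']
  rw [show A.length - A.length = 0 from by omega] at this
  exact this

theorem chaseDown_bridge (A : List Int) (g : Nat → Nat) (tbl : List Int) (j' : Nat)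
    (hj' : j' < A.length)
    (hl : tbl.length = A.length)
    (hgb : ∀ q, q < A.length → g q ≤ A.length)
    (hrel : ∀ q, q < A.length → tbl.getD (A.length - 1 - q) 0
      = (A.length : Int) - 1 - Int.ofNat (g q)) :
    ∀ fuel p, p ≤ A.length →
      pvChaseDown A tbl (A.length - 1 - j') fuel ((A.length : Int) - 1 - Int.ofNat p)
        = (A.length : Int) - 1 - Int.ofNat (jchainM (pvCRev A) A.length g j' fuel p) := by
  intro fuel
  induction fuel with
  | zero => intro p _; rfl
  | succ fuel ih =>
    intro p hp
    simp only [pvChaseDown, jchainM]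
    by_cases hpn : p < A.length
    · have htn : ((A.length : Int) - 1 - Int.ofNat p).toNat = A.length - 1 - p := by
        simp only [Int.ofNat_eq_natCast]
        omega
      by_cases hcv : A.getD (A.length - 1 - j') 0 < 2 * A.getD (A.length - 1 - p) 0
      · have hcC : pvCRev A j' p = true := by
          unfold pvCRev pvC
          exact decide_eq_true hcv
        rw [if_neg (by rw [htn]; intro hx; exact hcv.not_ge hx.2), if_neg (by simp [hcC])]
      · have hcC : pvCRev A j' p = false := by
          unfold pvCRev pvC
          exact decide_eq_false hcv
        rw [if_pos (by
            rw [htn]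
            refine ⟨by simp [Int.ofNat_eq_natCast]; omega, by omega⟩),
          if_pos ⟨hpn, hcC⟩, htn, hrel p hpn]
        exact ih (g p) (hgb p hpn)
    · rw [if_neg (by
          intro hx
          have := hx.1
          simp [Int.ofNat_eq_natCast] at this
          omega),
        if_neg (by intro hx; exact hpn hx.1)]

theorem stageB_bwd (A : List Int) :
    ∀ k, k ≤ A.length →
      ((List.range k).foldl
          (fun post j => post.set j (pvChaseDown A post j (A.length+1) (Int.ofNat j - 1)))
          (List.replicate A.length (-1 : Int))).length = A.length ∧
      ∀ y, y < A.length →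
        ((List.range k).foldl
            (fun post j => post.set j (pvChaseDown A post j (A.length+1) (Int.ofNat j - 1)))
            (List.replicate A.length (-1 : Int))).getD (A.length - 1 - y) 0
          = (A.length : Int) - 1 - Int.ofNat (pvTB (pvCRev A) A.length k y) := by
  intro k
  induction k with
  | zero =>
    intro _
    refine ⟨by simp, ?_⟩
    intro y hy
    have hlt : A.length - 1 - y < A.length := by omega
    simp [pvTB, hlt, Int.ofNat_eq_natCast]
  | succ k ih =>
    intro hk
    obtain ⟨ihl, ihrel⟩ := ih (by omega)
    rw [List.range_succ, List.foldl_append, List.foldl_cons, List.foldl_nil]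
    set tblk := (List.range k).foldl
        (fun post j => post.set j (pvChaseDown A post j (A.length+1) (Int.ofNat j - 1)))
        (List.replicate A.length (-1 : Int)) with htblk
    clear_value tblk
    have hkn : k < A.length := by omega
    have hj' : A.length - 1 - k < A.length := by omega
    have hrow : A.length - 1 - (A.length - 1 - k) = k := by omega
    have hstart : (Int.ofNat k - 1 : Int)
        = (A.length : Int) - 1 - Int.ofNat (A.length - (k+1) + 1) := by
      simp only [Int.ofNat_eq_natCast]
      omega
    have hchase := chaseDown_bridge A (pvTB (pvCRev A) A.length k) tblk (A.length - 1 - k)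
      hj' ihl (fun q hq => (pvTB_bounds (pvCRev A) A.length k (by omega) q).1) ihrel
      (A.length+1) (A.length - (k+1) + 1) (by omega)
    rw [hrow] at hchase
    refine ⟨by simp [ihl], ?_⟩
    intro y hy
    have hb1 : k < tblk.length := by rw [ihl]; omega
    have hb2 : A.length - 1 - y < tblk.length := by rw [ihl]; omega
    rw [getD_set_lt tblk k (A.length - 1 - y) _ hb1 hb2]
    by_cases hyk : y = A.length - 1 - k
    · subst hyk
      rw [if_pos (by omega), hstart, hchase]
      rw [show A.length - 1 - k = A.length - (k+1) from by omega, pvTB_succ_self]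
    · rw [if_neg (by omega), ihrel y hy]
      have : pvTB (pvCRev A) A.length (k+1) y = pvTB (pvCRev A) A.length k y := by
        simp only [pvTB]
        rw [if_neg (by omega)]
      rw [this]

-- port B backward pass produces the mirrored jump table
theorem bridgeB_bwd (A : List Int) :
    ∀ x, x < A.length →
      ((List.range A.length).foldl
          (fun post j => post.set j (pvChaseDown A post j (A.length+1) (Int.ofNat j - 1)))
          (List.replicate A.length (-1 : Int))).getD x 0
        = (A.length : Int) - 1 - Int.ofNat (pvT (pvCRev A) A.length (A.length - 1 - x)) := by
  intro x hx
  have := (stageB_bwd A A.length (le_refl _)).2 (A.length - 1 - x) (by omega)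
  rwa [show A.length - 1 - (A.length - 1 - x) = x from by omega] at this

-- ===== VERDICT (by name: the statement is the Claim_ definition above) =====
theorem foldl_sum_congr (L : List Nat) (g h : Nat → Int) :
    ∀ (a : Int), (∀ i ∈ L, g i = h i) →
      L.foldl (fun ans i => ans + g i - 1) a = L.foldl (fun ans i => ans + h i - 1) a := by
  induction L with
  | nil => intro a _; rfl
  | cons x L ih =>
    intro a hgh
    simp only [List.foldl_cons]
    rw [hgh x List.mem_cons_self]
    exact ih (a + h x - 1) (fun i hi => hgh i (List.mem_cons_of_mem _ hi))

theorem solve_spec : Claim_equal_solve := by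
  intro A _
  unfold Spec_solve solve solve_alt
  simp only []
  apply foldl_sum_congr (g := fun i =>
      ((((List.range A.length).foldl (pvStep A)
          (List.replicate A.length (Int.ofNat A.length), [])).1).getD i 0 - Int.ofNat i)
        * (Int.ofNat i -
          (((List.range A.length).reverse.foldl (pvStep A)
            (List.replicate A.length (-1 : Int), [])).1).getD i 0))
    (h := fun i =>
      (((List.range A.length).reverse.foldl
          (fun pre j => pre.set j (pvChaseUp A A.length pre j (A.length+1) (Int.ofNat (j+1))))
          (List.replicate A.length (Int.ofNat A.length))).getD i 0 - Int.ofNat i)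
        * (Int.ofNat i -
          ((List.range A.length).foldl
            (fun post j => post.set j (pvChaseDown A post j (A.length+1) (Int.ofNat j - 1)))
            (List.replicate A.length (-1 : Int))).getD i 0))
  intro i hi
  have hin : i < A.length := List.mem_range.1 hi
  rw [bridgeA_fwd A i hin, bridgeB_fwd A i hin, bridgeA_bwd A i hin, bridgeB_bwd A i hin]
  rw [runM_eq_pvT (pvC A) A.length i hin,
    runM_eq_pvT (pvCRev A) A.length (A.length - 1 - i) (by omega)]
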